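-- pv_equiv track=rewrite | github.com/patrickRauer/Phosphorpy | Phosphorpy/data/sub/magnitudes.py | get_survey_cols
-- ===== SOURCE A (Python) =====
-- def get_survey_cols(cols, s_cols, prefix):
--     """
--     Returns the names of the magnitudes in a specific survey
--
--     :param cols:
--     :param s_cols:
--     :param prefix:
--     :return:
--     """
--     out = []
--     prefix_cond = len(prefix) == 0
--     for i, c in enumerate(cols):
--         for j, s in enumerate(s_cols):
--             # if the survey magnitude name is in and the prefix is in
--             # of if there is no prefix and the magnitude name is equal to the survey name
--             if ((s in c and prefix in c and not prefix_cond) or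
--                     (prefix_cond and (c == s or 'mag' in c))):
--                 out.append(c)
--                 break
--
--     cols_new = []
--     for i, c in enumerate(cols):
--         if c not in out:
--             cols_new.append(c)
--     return cols_new, out
-- ===== SOURCE B (Python) =====
-- def get_survey_cols(cols, s_cols, prefix):
--     """Single pass: classify each column as matched or not; avoids A's second
--     scan with its `c not in out` membership test."""
--     cols_new = []
--     out = []
--     prefix_cond = len(prefix) == 0
--     for c in cols:
--         matched = False
--         for s in s_cols:
--             if ((s in c and prefix in c and not prefix_cond) or
--                     (prefix_cond and (c == s or 'mag' in c))):
--                 matched = True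
--                 break
--         if matched:
--             out.append(c)
--         else:
--             cols_new.append(c)
--     return cols_new, out
-- ===== Notes on version B (the rewrite author's own statement) =====
-- stated objective: simpler
-- what changed: B classifies each column in a single pass over cols, appending to out or cols_new directly, instead of A's two passes where the second filters cols by list membership in out.
import Mathlib
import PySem

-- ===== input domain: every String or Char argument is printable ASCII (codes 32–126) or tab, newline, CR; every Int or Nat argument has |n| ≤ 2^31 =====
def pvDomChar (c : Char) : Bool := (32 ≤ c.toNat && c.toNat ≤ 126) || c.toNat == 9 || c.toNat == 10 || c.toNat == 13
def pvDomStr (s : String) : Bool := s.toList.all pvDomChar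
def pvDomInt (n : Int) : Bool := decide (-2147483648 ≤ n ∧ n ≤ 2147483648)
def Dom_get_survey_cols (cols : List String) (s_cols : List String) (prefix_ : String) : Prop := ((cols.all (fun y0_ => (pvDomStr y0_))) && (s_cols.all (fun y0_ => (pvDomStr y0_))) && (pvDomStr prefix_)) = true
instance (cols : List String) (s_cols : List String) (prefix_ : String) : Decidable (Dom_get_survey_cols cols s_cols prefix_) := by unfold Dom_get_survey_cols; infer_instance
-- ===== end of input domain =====

-- B classifies each column in one pass (matched → out, else cols_new), instead of A's
-- second pass filtering cols by membership in out; objective: simpler.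

-- ===== PORT A =====
-- inner `for s in s_cols: … break` loop of A: true as soon as some s matches c
def pvInnerA (c : String) (prefix_ : String) (prefix_cond : Bool) : List String → Bool
  | [] => false
  | s :: rest =>
      if ((PySem.Str.isIn s c && PySem.Str.isIn prefix_ c && !prefix_cond) ||
          (prefix_cond && (c == s || PySem.Str.isIn "mag" c))) then true
      else pvInnerA c prefix_ prefix_cond rest

def get_survey_cols (cols : List String) (s_cols : List String) (prefix_ : String) : List String × List String :=
  let prefix_cond : Bool := PySem.Str.len prefix_ == 0
  let out : List String :=
    cols.foldl (fun out c => if pvInnerA c prefix_ prefix_cond s_cols then out ++ [c] else out) []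
  let cols_new : List String :=
    cols.foldl (fun acc c => if !(out.contains c) then acc ++ [c] else acc) []
  (cols_new, out)

-- ===== PORT B =====
-- same match predicate, written as B's inner loop with break
def pvInnerB (c : String) (prefix_ : String) (prefix_cond : Bool) : List String → Bool
  | [] => false
  | s :: rest =>
      if ((PySem.Str.isIn s c && PySem.Str.isIn prefix_ c && !prefix_cond) ||
          (prefix_cond && (c == s || PySem.Str.isIn "mag" c))) then true
      else pvInnerB c prefix_ prefix_cond rest

-- B's single pass over cols with the two accumulators (cols_new, out)
def pvLoopB (s_cols : List String) (prefix_ : String) (prefix_cond : Bool)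
    (cols_new out : List String) : List String → List String × List String
  | [] => (cols_new, out)
  | c :: rest =>
      if pvInnerB c prefix_ prefix_cond s_cols then
        pvLoopB s_cols prefix_ prefix_cond cols_new (out ++ [c]) rest
      else
        pvLoopB s_cols prefix_ prefix_cond (cols_new ++ [c]) out rest

def get_survey_cols_alt (cols : List String) (s_cols : List String) (prefix_ : String) : List String × List String :=
  let prefix_cond : Bool := PySem.Str.len prefix_ == 0
  pvLoopB s_cols prefix_ prefix_cond [] [] cols

-- ===== PRECONDITION & SPEC =====
def Spec_get_survey_cols (cols : List String) (s_cols : List String) (prefix_ : String) (out : List String × List String) : Prop := out = get_survey_cols_alt cols s_cols prefix_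
instance (cols : List String) (s_cols : List String) (prefix_ : String) (out : List String × List String) : Decidable (Spec_get_survey_cols cols s_cols prefix_ out) := by unfold Spec_get_survey_cols; infer_instance

-- ===== CLAIM (what is proved, stated in full; the proofs are below) =====
def Claim_equal_get_survey_cols : Prop := ∀ (cols : List String) (s_cols : List String) (prefix_ : String), Dom_get_survey_cols cols s_cols prefix_ → Spec_get_survey_cols cols s_cols prefix_ (get_survey_cols cols s_cols prefix_)

-- ===== LEMMAS AND PROOFS =====

theorem pvInner_eq (c prefix_ : String) (pc : Bool) (l : List String) :
    pvInnerA c prefix_ pc l = pvInnerB c prefix_ pc l := by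
  induction l with
  | nil => rfl
  | cons s rest ih => simp [pvInnerA, pvInnerB, ih]

-- B's loop appends exactly the non-matching / matching columns to the two accumulators
theorem pvLoopB_spec (s_cols : List String) (prefix_ : String) (pc : Bool)
    (l cn out : List String) :
    pvLoopB s_cols prefix_ pc cn out l =
      (cn ++ l.filter (fun c => !pvInnerB c prefix_ pc s_cols),
       out ++ l.filter (fun c => pvInnerB c prefix_ pc s_cols)) := by
  induction l generalizing cn out with
  | nil => simp [pvLoopB]
  | cons c rest ih =>
      by_cases h : pvInnerB c prefix_ pc s_cols
      · simp [pvLoopB, h, ih]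
      · simp [pvLoopB, h, ih]

theorem get_survey_cols_spec : Claim_equal_get_survey_cols := by
  intro cols s_cols prefix_ _
  unfold Spec_get_survey_cols
  unfold get_survey_cols get_survey_cols_alt
  set pc : Bool := PySem.Str.len prefix_ == 0 with hpc
  rw [pvLoopB_spec]
  have hout : cols.foldl (fun out c => if pvInnerA c prefix_ pc s_cols then out ++ [c] else out) [] =
      cols.filter (fun c => pvInnerB c prefix_ pc s_cols) := by
    simpa [pvInner_eq] using
      PySem.List.foldl_append_if_eq_filter (l := cols)
        (p := fun c => pvInnerA c prefix_ pc s_cols) (acc := [])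
  refine Prod.ext ?_ ?_
  · -- first components: A's second pass = filter of non-matching columns
    show cols.foldl (fun acc c =>
        if !((cols.foldl (fun out c => if pvInnerA c prefix_ pc s_cols then out ++ [c] else out) []).contains c)
        then acc ++ [c] else acc) [] = _
    rw [hout]
    rw [PySem.List.foldl_congr_mem
      (g := fun acc c => if !pvInnerB c prefix_ pc s_cols then acc ++ [c] else acc)
      (h := by
        intro acc c hc
        have : (cols.filter (fun c => pvInnerB c prefix_ pc s_cols)).contains c
            = pvInnerB c prefix_ pc s_cols := by
          by_cases hm : pvInnerB c prefix_ pc s_cols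
          · simp [List.mem_filter, hc, hm]
          · simp [List.mem_filter, hm]
        rw [this])]
    simpa using
      PySem.List.foldl_append_if_eq_filter (l := cols)
        (p := fun c => !pvInnerB c prefix_ pc s_cols) (acc := [])
  · show cols.foldl (fun out c => if pvInnerA c prefix_ pc s_cols then out ++ [c] else out) [] = _
    rw [hout]; simp

-- ===== VERDICT (by name: the statement is the Claim_ definition above) =====
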